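-- pv_equiv track=rewrite | github.com/TerpsRacing-Baja/Data-Processing | fall2023RPM/rpm.py | getLineSegmentsFromStepFunction
-- ===== SOURCE A (Python) =====
-- def getLineSegmentsFromStepFunction(t: list, y: list) -> tuple:
--     pointer = 0
--     index = 0
--     currentTValue = t[0]
--     currentYValue = y[0]
--     intervalValues = []
--     yValues = []
--     for dt, dy in zip(t, y):
--         if (dy != currentYValue):
--             intervalValues.append([currentTValue, dt])
--             yValues.append(currentYValue)
--             currentTValue = dt
--             currentYValue = dy
--             pointer = index
--         index += 1
--     # accounts for the last static line segment
--     if (pointer != len(t)):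
--         intervalValues.append((currentTValue, t[-1]))
--         yValues.append(y[-1])
--     return intervalValues, yValues
-- ===== SOURCE B (Python) =====
-- def getLineSegmentsFromStepFunction(t: list, y: list) -> tuple:
--     n = min(len(t), len(y))
--     # indices where the step function changes value
--     changes = [i for i in range(1, n) if y[i] != y[i - 1]]
--     starts = [0] + changes
--     ends = changes + [len(t) - 1]
--     intervals = [[t[a], t[b]] for a, b in zip(starts, ends)]
--     # each segment carries the value it held just before its end;
--     # the final segment runs to the end of the data
--     values = [y[e - 1] for e in changes] + [y[-1]]
--     return intervals, values
-- ===== Notes on version B (the rewrite author's own statement) =====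
-- stated objective: alternative
-- what changed: A emits segments inside a single stateful loop (pointer/index/currentT/currentY bookkeeping plus a trailing flush); B first computes the list of change indices of y, then builds the intervals by zipping segment-start indices with segment-end indices and reads each segment's value at the index just before its end.
import Mathlib
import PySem

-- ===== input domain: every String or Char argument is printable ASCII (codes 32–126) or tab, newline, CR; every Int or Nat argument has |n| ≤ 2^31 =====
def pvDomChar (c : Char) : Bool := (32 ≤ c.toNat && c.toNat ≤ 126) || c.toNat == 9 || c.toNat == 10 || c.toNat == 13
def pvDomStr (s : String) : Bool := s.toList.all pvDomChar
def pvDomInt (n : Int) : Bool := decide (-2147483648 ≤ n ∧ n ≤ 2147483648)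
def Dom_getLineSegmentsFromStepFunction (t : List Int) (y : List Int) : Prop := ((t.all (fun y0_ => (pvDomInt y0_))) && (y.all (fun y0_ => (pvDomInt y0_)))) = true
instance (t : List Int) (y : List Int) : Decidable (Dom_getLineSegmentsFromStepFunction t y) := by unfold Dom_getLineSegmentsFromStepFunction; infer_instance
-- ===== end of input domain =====

-- B replaces A's single stateful loop (pointer/index/currentT/currentY bookkeeping plus
-- a trailing flush) by an index decomposition: collect the change indices of y, zip
-- segment-start indices with segment-end indices, and read each segment's value at the
-- index just before its end (objective: alternative decomposition, same cost).

-- ===== PORT A =====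
-- loop body of A's `for dt, dy in zip(t, y)` over state (pointer, index, currentT, currentY, intervalValues, yValues)
def pvStepA (s : Int × Int × Int × Int × List (List Int) × List Int) (p : Int × Int) :
    Int × Int × Int × Int × List (List Int) × List Int :=
  let (pointer, index, cT, cY, iv, yv) := s
  if p.2 ≠ cY then
    (index, index + 1, p.1, p.2, iv ++ [[cT, p.1]], yv ++ [cY])
  else
    (pointer, index + 1, cT, cY, iv, yv)

def getLineSegmentsFromStepFunction (t : List Int) (y : List Int) : List (List Int) × List Int :=
  match t, y with
  | [], _ => ([], [])          -- t[0] raises IndexError: outside Pre_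
  | _ :: _, [] => ([], [])     -- y[0] raises IndexError: outside Pre_
  | t0 :: ts, y0 :: ys =>
    let s := (List.zip (t0 :: ts) (y0 :: ys)).foldl pvStepA
      (0, 0, t0, y0, ([] : List (List Int)), ([] : List Int))
    let (pointer, _, cT, _, iv, yv) := s
    if pointer ≠ (((t0 :: ts).length : Nat) : Int) then
      (iv ++ [[cT, (t0 :: ts).getLastD 0]], yv ++ [(y0 :: ys).getLastD 0])
    else (iv, yv)

-- ===== PORT B =====
-- `range(1, n)` is ported as the naturals below n with 1 ≤ i (exact: the indices are
-- nonnegative); list indexing is ported with List.getD and y[-1] with getLastD (exact on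
-- Pre_, where every index Source B uses is in range — on empty t or y Source B raises IndexError).
def getLineSegmentsFromStepFunction_alt (t : List Int) (y : List Int) : List (List Int) × List Int :=
  let n := min t.length y.length
  let changes : List Nat :=
    (List.range n).filter (fun i => decide (1 ≤ i) && decide (y.getD i 0 ≠ y.getD (i - 1) 0))
  let starts := 0 :: changes
  let ends := changes ++ [t.length - 1]
  let intervals := (starts.zip ends).map (fun p => [t.getD p.1 0, t.getD p.2 0])
  let values := changes.map (fun e => y.getD (e - 1) 0) ++ [y.getLastD 0]
  (intervals, values)

-- ===== PRECONDITION & SPEC =====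
-- A raises IndexError (t[0] / y[0]) on empty t or empty y; exactly those inputs are excluded.
def Pre_getLineSegmentsFromStepFunction (t : List Int) (y : List Int) : Prop := t ≠ [] ∧ y ≠ []
instance (t : List Int) (y : List Int) : Decidable (Pre_getLineSegmentsFromStepFunction t y) := by
  unfold Pre_getLineSegmentsFromStepFunction; infer_instance
def pvWitness_getLineSegmentsFromStepFunction : List Int × List Int := ([0, 1, 2], [5, 5, 7])

def Spec_getLineSegmentsFromStepFunction (t : List Int) (y : List Int) (out : List (List Int) × List Int) : Prop := out = getLineSegmentsFromStepFunction_alt t y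
instance (t : List Int) (y : List Int) (out : List (List Int) × List Int) : Decidable (Spec_getLineSegmentsFromStepFunction t y out) := by unfold Spec_getLineSegmentsFromStepFunction; infer_instance

-- ===== CLAIM (what is proved, stated in full; the proofs are below) =====
def Claim_equal_getLineSegmentsFromStepFunction : Prop := ∀ (t : List Int) (y : List Int), Dom_getLineSegmentsFromStepFunction t y → Pre_getLineSegmentsFromStepFunction t y → Spec_getLineSegmentsFromStepFunction t y (getLineSegmentsFromStepFunction t y)

-- ===== LEMMAS AND PROOFS =====

-- the segments/values/final-currentT that A's loop emits from state (cT, cY) over the rest of the zip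
def pvEmit (cT cY : Int) : List (Int × Int) → List (List Int) × List Int × Int
  | [] => ([], [], cT)
  | p :: rest =>
    if p.2 ≠ cY then
      let r := pvEmit p.1 p.2 rest
      ([cT, p.1] :: r.1, cY :: r.2.1, r.2.2)
    else pvEmit cT cY rest

-- the run starts A's emission passes after a run with value cY
def pvRunsTail (cY : Int) : List (Int × Int) → List (Int × Int)
  | [] => []
  | p :: rest => if p.2 ≠ cY then p :: pvRunsTail p.2 rest else pvRunsTail cY rest

-- the y-values A emits: the value held just before each change
def pvSelV (v : Int) : List (Int × Int) → List Int
  | [] => []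
  | p :: rest => if p.2 ≠ v then v :: pvSelV p.2 rest else pvSelV p.2 rest

-- the change indices of a zipped list, relative to previous value v
def pvF (v : Int) (z : List (Int × Int)) : List Nat :=
  (List.range z.length).filter
    (fun j => decide ((z.getD j (0, 0)).2 ≠ if j = 0 then v else (z.getD (j - 1) (0, 0)).2))

lemma pvFoldA_spec (zs : List (Int × Int)) : ∀ (ptr idx cT cY : Int)
    (iv : List (List Int)) (yv : List Int),
    ∃ ptr' cY', zs.foldl pvStepA (ptr, idx, cT, cY, iv, yv)
      = (ptr', idx + (zs.length : Int), (pvEmit cT cY zs).2.2, cY',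
         iv ++ (pvEmit cT cY zs).1, yv ++ (pvEmit cT cY zs).2.1)
      ∧ (ptr' = ptr ∨ (idx ≤ ptr' ∧ ptr' < idx + (zs.length : Int))) := by
  induction zs with
  | nil => intro ptr idx cT cY iv yv; exact ⟨ptr, cY, by simp [pvEmit], Or.inl rfl⟩
  | cons p rest ih =>
    intro ptr idx cT cY iv yv
    have harr : idx + 1 + (rest.length : Int) = idx + (((p :: rest).length : Nat) : Int) := by
      push_cast [List.length_cons]; ring
    by_cases h : p.2 = cY
    · obtain ⟨ptr', cY', heq, hb⟩ := ih ptr (idx + 1) cT cY iv yv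
      have hstep : pvStepA (ptr, idx, cT, cY, iv, yv) p = (ptr, idx + 1, cT, cY, iv, yv) := by
        simp [pvStepA, h]
      have hem : pvEmit cT cY (p :: rest) = pvEmit cT cY rest := by simp [pvEmit, h]
      refine ⟨ptr', cY', ?_, ?_⟩
      · rw [List.foldl_cons, hstep, heq, hem, harr]
      · simp only [List.length_cons] at hb ⊢; omega
    · obtain ⟨ptr', cY', heq, hb⟩ := ih idx (idx + 1) p.1 p.2 (iv ++ [[cT, p.1]]) (yv ++ [cY])
      have hstep : pvStepA (ptr, idx, cT, cY, iv, yv) p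
          = (idx, idx + 1, p.1, p.2, iv ++ [[cT, p.1]], yv ++ [cY]) := by
        simp [pvStepA, h]
      have hem : pvEmit cT cY (p :: rest)
          = ([cT, p.1] :: (pvEmit p.1 p.2 rest).1, cY :: (pvEmit p.1 p.2 rest).2.1,
             (pvEmit p.1 p.2 rest).2.2) := by
        simp [pvEmit, h]
      refine ⟨ptr', cY', ?_, ?_⟩
      · rw [List.foldl_cons, hstep, heq, hem, harr]
        simp [List.append_assoc]
      · simp only [List.length_cons] at hb ⊢; omega

lemma pvEmit_eq_runs (zs : List (Int × Int)) : ∀ (cT cY : Int),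
    pvEmit cT cY zs
      = (((cT :: (pvRunsTail cY zs).map Prod.fst).zip ((pvRunsTail cY zs).map Prod.fst)).map
           (fun p => [p.1, p.2]),
         (((cT, cY) :: pvRunsTail cY zs).dropLast).map Prod.snd,
         ((pvRunsTail cY zs).getLastD (cT, cY)).1) := by
  induction zs with
  | nil => intro cT cY; simp [pvEmit, pvRunsTail]
  | cons p rest ih =>
    intro cT cY
    by_cases h : p.2 = cY
    · simp [pvEmit, pvRunsTail, h, ih]
    · have hem : pvEmit cT cY (p :: rest)
          = ([cT, p.1] :: (pvEmit p.1 p.2 rest).1, cY :: (pvEmit p.1 p.2 rest).2.1,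
             (pvEmit p.1 p.2 rest).2.2) := by
        simp [pvEmit, h]
      have hrt : pvRunsTail cY (p :: rest) = p :: pvRunsTail p.2 rest := by
        simp [pvRunsTail, h]
      rw [hem, hrt, ih p.1 p.2]
      cases hR : pvRunsTail p.2 rest with
      | nil => simp
      | cons r rs =>
        simp only [List.map_cons, List.zip_cons_cons, List.getLastD_cons,
          List.dropLast_cons₂]

lemma pvGetLastD_map_fst (R : List (Int × Int)) : ∀ (d : Int × Int),
    (R.map Prod.fst).getLastD d.1 = (R.getLastD d).1 := by
  induction R with
  | nil => intro d; rfl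
  | cons p rest ih =>
    intro d
    rw [List.map_cons, List.getLastD_cons, List.getLastD_cons]
    exact ih p

-- A's emitted y-values are the values just before each change
lemma pvEmit_snd_eq_selV (zs : List (Int × Int)) : ∀ (cT cY : Int),
    (pvEmit cT cY zs).2.1 = pvSelV cY zs := by
  induction zs with
  | nil => intro cT cY; simp [pvEmit, pvSelV]
  | cons p rest ih =>
    intro cT cY
    by_cases h : p.2 = cY
    · rw [show pvEmit cT cY (p :: rest) = pvEmit cT cY rest from by simp [pvEmit, h],
          ih cT cY,
          show pvSelV cY (p :: rest) = pvSelV p.2 rest from by simp [pvSelV, h], h]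
    · simp [pvEmit, pvSelV, h, ih]

lemma pvF_cons (v : Int) (p : Int × Int) (w : List (Int × Int)) :
    pvF v (p :: w) = (if p.2 ≠ v then [0] else []) ++ (pvF p.2 w).map Nat.succ := by
  unfold pvF
  rw [List.length_cons, List.range_succ_eq_map, List.filter_cons, List.filter_map]
  have hpred : ∀ j ∈ List.range w.length,
      ((fun j => decide (((p :: w).getD j (0, 0)).2
          ≠ if j = 0 then v else ((p :: w).getD (j - 1) (0, 0)).2)) ∘ Nat.succ) j
      = (fun j => decide ((w.getD j (0, 0)).2
          ≠ if j = 0 then p.2 else (w.getD (j - 1) (0, 0)).2)) j := by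
    intro j _
    cases j with
    | zero => simp
    | succ k => simp
  rw [List.filter_congr hpred]
  by_cases h : p.2 = v <;> simp [h]

lemma pvF_map_getD (zs : List (Int × Int)) : ∀ (v : Int),
    (pvF v zs).map (fun j => zs.getD j (0, 0)) = pvRunsTail v zs := by
  induction zs with
  | nil => intro v; simp [pvF, pvRunsTail]
  | cons p w ih =>
    intro v
    rw [pvF_cons, List.map_append, List.map_map]
    have h2 : (pvF p.2 w).map ((fun j => (p :: w).getD j (0, 0)) ∘ Nat.succ)
        = (pvF p.2 w).map (fun j => w.getD j (0, 0)) := by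
      apply List.map_congr_left; intro j _; simp
    rw [h2, ih p.2]
    by_cases h : p.2 = v <;> simp [pvRunsTail, h]

lemma pvF_map_pred (zs : List (Int × Int)) : ∀ (v : Int),
    (pvF v zs).map (fun j => if j = 0 then v else (zs.getD (j - 1) (0, 0)).2)
      = pvSelV v zs := by
  induction zs with
  | nil => intro v; simp [pvF, pvSelV]
  | cons p w ih =>
    intro v
    rw [pvF_cons, List.map_append, List.map_map]
    have h2 : (pvF p.2 w).map
          ((fun j => if j = 0 then v else ((p :: w).getD (j - 1) (0, 0)).2) ∘ Nat.succ)
        = (pvF p.2 w).map (fun j => if j = 0 then p.2 else (w.getD (j - 1) (0, 0)).2) := by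
      apply List.map_congr_left; intro j _
      cases j with
      | zero => simp
      | succ k => simp
    rw [h2, ih p.2]
    by_cases h : p.2 = v <;> simp [pvSelV, h]

lemma pvMem_pvF {v : Int} {zs : List (Int × Int)} {j : Nat} (h : j ∈ pvF v zs) :
    j < zs.length := by
  unfold pvF at h
  exact List.mem_range.mp (List.mem_of_mem_filter h)

lemma pvGetD_zip (a : List Int) : ∀ (b : List Int) (j : Nat), j < a.length → j < b.length →
    (a.zip b).getD j (0, 0) = (a.getD j 0, b.getD j 0) := by
  induction a with
  | nil => intro b j h _; simp at h
  | cons x xs ih =>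
    intro b j h1 h2
    cases b with
    | nil => simp at h2
    | cons z zs =>
      cases j with
      | zero => rfl
      | succ k =>
        simp only [List.zip_cons_cons, List.getD_cons_succ]
        exact ih zs k (by simpa using h1) (by simpa using h2)

lemma pvGetLastD_irrel {α : Type} (l : List α) (d d' : α) (h : l ≠ []) :
    l.getLastD d = l.getLastD d' := by
  cases l with
  | nil => exact absurd rfl h
  | cons x xs => rw [List.getLastD_cons, List.getLastD_cons]

lemma pvZip_append_last {α β : Type} (a : List α) : ∀ (b : List β) (x : β) (d : α),
    a.length = b.length + 1 → a.zip (b ++ [x]) = a.zip b ++ [(a.getLastD d, x)] := by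
  induction a with
  | nil => intro b x d h; simp at h
  | cons a0 as ih =>
    intro b x d h
    cases b with
    | nil =>
      have hnil : as = [] := List.length_eq_zero_iff.mp (by simpa using h)
      subst hnil; simp
    | cons b0 bs =>
      have hlen : as.length = bs.length + 1 := by simpa using h
      have hne : as ≠ [] := by
        cases as with
        | nil => simp at hlen
        | cons _ _ => simp
      rw [List.cons_append, List.zip_cons_cons, List.zip_cons_cons, ih bs x d hlen,
          List.getLastD_cons, pvGetLastD_irrel as d a0 hne]
      simp

lemma pvGetLastD_map {α β : Type} (f : α → β) (l : List α) : ∀ (d : α),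
    (l.map f).getLastD (f d) = f (l.getLastD d) := by
  induction l with
  | nil => intro d; rfl
  | cons x xs ih =>
    intro d
    simp only [List.map_cons, List.getLastD_cons]
    exact ih x

lemma pvGetD_last (t0 : Int) (ts : List Int) : ∀ (d : Int),
    (t0 :: ts).getD ts.length d = (t0 :: ts).getLastD d := by
  induction ts generalizing t0 with
  | nil => intro d; rfl
  | cons x xs ih =>
    intro d
    simp only [List.length_cons, List.getD_cons_succ]
    rw [ih x d]
    simp only [List.getLastD_cons]

-- B's interval pass, split into the zipped part and the final segment
lemma pvB_first (fn : Nat → Int) (c : List Nat) (m : Nat) :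
    (((0 : Nat) :: c).zip (c ++ [m])).map (fun p => [fn p.1, fn p.2])
      = ((fn 0 :: c.map fn).zip (c.map fn)).map (fun p => [p.1, p.2])
        ++ [[(c.map fn).getLastD (fn 0), fn m]] := by
  rw [pvZip_append_last ((0 : Nat) :: c) c m 0 (by simp), List.map_append]
  congr 1
  · rw [show fn 0 :: c.map fn = ((0 : Nat) :: c).map fn from (List.map_cons ..).symm,
        List.zip_map, List.map_map]
    rfl
  · simp only [List.map_cons, List.map_nil]
    rw [← pvGetLastD_map fn ((0 : Nat) :: c) 0, List.map_cons, List.getLastD_cons]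

-- ===== VERDICT (by name: the statement is the Claim_ definition above) =====
theorem getLineSegmentsFromStepFunction_spec : Claim_equal_getLineSegmentsFromStepFunction := by
  intro t y _ hpre
  obtain ⟨ht, hy⟩ := hpre
  match t, y with
  | t0 :: ts, y0 :: ys =>
    unfold Spec_getLineSegmentsFromStepFunction
    show getLineSegmentsFromStepFunction (t0 :: ts) (y0 :: ys)
        = getLineSegmentsFromStepFunction_alt (t0 :: ts) (y0 :: ys)
    have hz : List.zip (t0 :: ts) (y0 :: ys) = (t0, y0) :: List.zip ts ys := rfl
    obtain ⟨ptr', cY', heq, hb⟩ :=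
      pvFoldA_spec ((t0, y0) :: List.zip ts ys) 0 0 t0 y0 [] []
    have hlen : ((t0, y0) :: List.zip ts ys).length ≤ (t0 :: ts).length := by
      rw [← hz, List.length_zip]; omega
    have hptr : ptr' ≠ (((t0 :: ts).length : Nat) : Int) := by
      have hpos : 0 < (t0 :: ts).length := by simp
      rcases hb with h | h
      · subst h; intro hc; omega
      · intro hc; omega
    have hA : getLineSegmentsFromStepFunction (t0 :: ts) (y0 :: ys)
        = ([] ++ (pvEmit t0 y0 ((t0, y0) :: List.zip ts ys)).1
             ++ [[(pvEmit t0 y0 ((t0, y0) :: List.zip ts ys)).2.2, (t0 :: ts).getLastD 0]],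
           [] ++ (pvEmit t0 y0 ((t0, y0) :: List.zip ts ys)).2.1 ++ [(y0 :: ys).getLastD 0]) := by
      show (let s := ((t0 :: ts).zip (y0 :: ys)).foldl pvStepA
              (0, 0, t0, y0, ([] : List (List Int)), ([] : List Int))
            let (pointer, _, cT, _, iv, yv) := s
            if pointer ≠ (((t0 :: ts).length : Nat) : Int) then
              (iv ++ [[cT, (t0 :: ts).getLastD 0]], yv ++ [(y0 :: ys).getLastD 0])
            else (iv, yv)) = _
      rw [show ((t0 :: ts).zip (y0 :: ys)) = (t0, y0) :: List.zip ts ys from hz, heq]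
      simp only [if_pos hptr, List.append_assoc]
    have hfirst : pvEmit t0 y0 ((t0, y0) :: List.zip ts ys) = pvEmit t0 y0 (List.zip ts ys) := by
      simp [pvEmit]
    -- bookkeeping about zipped indices
    have hjz : ∀ j, j < (List.zip ts ys).length →
        (List.zip ts ys).getD j (0, 0) = (ts.getD j 0, ys.getD j 0) := by
      intro j hj
      rw [List.length_zip] at hj
      exact pvGetD_zip ts ys j (by omega) (by omega)
    have hmin : min (t0 :: ts).length (y0 :: ys).length = (List.zip ts ys).length + 1 := by
      simp [List.length_zip, Nat.succ_min_succ]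
    -- B's change indices are the shifted change indices of the tail zip
    have hchg : (List.range (min (t0 :: ts).length (y0 :: ys).length)).filter
          (fun i => decide (1 ≤ i) && decide ((y0 :: ys).getD i 0 ≠ (y0 :: ys).getD (i - 1) 0))
        = (pvF y0 (List.zip ts ys)).map Nat.succ := by
      rw [hmin, List.range_succ_eq_map, List.filter_cons]
      have h0 : (decide (1 ≤ (0 : Nat))
          && decide ((y0 :: ys).getD 0 0 ≠ (y0 :: ys).getD (0 - 1) 0)) = false := by
        simp
      rw [h0, if_neg (by simp), List.filter_map]
      apply congrArg (List.map Nat.succ)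
      unfold pvF
      apply List.filter_congr
      intro j hj
      have hjl : j < (List.zip ts ys).length := List.mem_range.mp hj
      have e1 : (y0 :: ys).getD (j + 1) 0 = ((List.zip ts ys).getD j (0, 0)).2 := by
        rw [List.getD_cons_succ, hjz j hjl]
      have e2 : (y0 :: ys).getD j 0
          = (if j = 0 then y0 else ((List.zip ts ys).getD (j - 1) (0, 0)).2) := by
        cases j with
        | zero => simp
        | succ k =>
          have hk : k < (ts.zip ys).length := by omega
          rw [List.getD_cons_succ, show k + 1 - 1 = k from rfl, hjz k hk]
          simp
      have e3 : decide (1 ≤ j + 1) = true := decide_eq_true (Nat.succ_le_succ (Nat.zero_le j))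
      simp only [Function.comp_apply, e3, Bool.true_and, Nat.succ_sub_one, e1, e2]
    -- B's values are A's emitted values
    have hvals : ((pvF y0 (List.zip ts ys)).map Nat.succ).map (fun e => (y0 :: ys).getD (e - 1) 0)
        = pvSelV y0 (List.zip ts ys) := by
      rw [List.map_map]
      have h2 : (pvF y0 (List.zip ts ys)).map ((fun e => (y0 :: ys).getD (e - 1) 0) ∘ Nat.succ)
          = (pvF y0 (List.zip ts ys)).map
              (fun j => if j = 0 then y0 else ((List.zip ts ys).getD (j - 1) (0, 0)).2) := by
        apply List.map_congr_left; intro j hj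
        have hjl : j < (List.zip ts ys).length := pvMem_pvF hj
        cases j with
        | zero => simp
        | succ k =>
          have hk : k < (ts.zip ys).length := by omega
          rw [Function.comp_apply, show k + 1 + 1 - 1 = k + 1 from rfl,
              List.getD_cons_succ, show k + 1 - 1 = k from rfl, hjz k hk]
          simp
      rw [h2, pvF_map_pred]
    -- B's shifted change indices, read through t, are A's run starts
    have hheads : ((pvF y0 (List.zip ts ys)).map Nat.succ).map (fun i : Nat => (t0 :: ts).getD i 0)
        = (pvRunsTail y0 (List.zip ts ys)).map Prod.fst := by
      rw [List.map_map]
      have h2 : (pvF y0 (List.zip ts ys)).map ((fun i : Nat => (t0 :: ts).getD i 0) ∘ Nat.succ)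
          = (pvF y0 (List.zip ts ys)).map
              (Prod.fst ∘ (fun j => (List.zip ts ys).getD j (0, 0))) := by
        apply List.map_congr_left; intro j hj
        have hjl : j < (List.zip ts ys).length := pvMem_pvF hj
        rw [Function.comp_apply, Function.comp_apply, List.getD_cons_succ, hjz j hjl]
      rw [h2, ← List.map_map, pvF_map_getD]
    -- assemble
    have hE1 : (pvEmit t0 y0 (List.zip ts ys)).1
        = ((t0 :: (pvRunsTail y0 (List.zip ts ys)).map Prod.fst).zip
            ((pvRunsTail y0 (List.zip ts ys)).map Prod.fst)).map (fun p => [p.1, p.2]) := by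
      rw [pvEmit_eq_runs]
    have hE21 : (pvEmit t0 y0 (List.zip ts ys)).2.1 = pvSelV y0 (List.zip ts ys) :=
      pvEmit_snd_eq_selV (List.zip ts ys) t0 y0
    have hE22 : (pvEmit t0 y0 (List.zip ts ys)).2.2
        = ((pvRunsTail y0 (List.zip ts ys)).getLastD (t0, y0)).1 := by
      rw [pvEmit_eq_runs]
    have hlastfst : ((pvRunsTail y0 (List.zip ts ys)).map Prod.fst).getLastD t0
        = ((pvRunsTail y0 (List.zip ts ys)).getLastD (t0, y0)).1 :=
      pvGetLastD_map_fst (pvRunsTail y0 (List.zip ts ys)) (t0, y0)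
    have hfin : (t0 :: ts).getD ((t0 :: ts).length - 1) 0 = (t0 :: ts).getLastD 0 := by
      rw [show (t0 :: ts).length - 1 = ts.length from by simp]
      exact pvGetD_last t0 ts 0
    rw [hA, hfirst, hE1, hE21, hE22]
    simp only [List.nil_append, getLineSegmentsFromStepFunction_alt]
    rw [hchg, hvals,
        pvB_first (fun i : Nat => (t0 :: ts).getD i 0)
          ((pvF y0 (List.zip ts ys)).map Nat.succ) ((t0 :: ts).length - 1),
        hheads, hfin, show (t0 :: ts).getD 0 0 = t0 from rfl, hlastfst]
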